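-- pv_equiv track=rewrite | github.com/littlepawn2/leetcode-stuff | Python/findandreplacepattern.py | findAndReplacePattern
-- ===== SOURCE A (Python) =====
-- def findAndReplacePattern(words, pattern):
--     successful = []
--
--     for word in words:
--         letterDict = dict()
--
--         for i in range(len(pattern)):
--             if pattern[i] in letterDict.keys():
--                 if letterDict.get(pattern[i]) != word[i]:
--                     break
--             else:
--                 if not word[i] in letterDict.values():
--                     letterDict[pattern[i]] = word[i]
--                 else:
--                     break
--         else:
--             successful.append(word)
--
--     return successful
-- ===== SOURCE B (Python) =====
-- def findAndReplacePattern(words, pattern):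
--     def norm(s):
--         seen = {}
--         return [seen.setdefault(c, len(seen)) for c in s]
--     n = len(pattern)
--     target = norm(pattern)
--     return [w for w in words if norm(w[:n]) == target]
-- ===== Notes on version B (the rewrite author's own statement) =====
-- stated objective: alternative
-- what changed: Instead of A's per-word incremental dict bijection check with a values() scan, B normalizes each string to its canonical first-occurrence fingerprint (norm) and filters words whose fingerprint of the first len(pattern) chars equals the pattern's fingerprint, computed once.
-- outside the precondition, e.g. on findAndReplacePattern(['ab'], 'aab'): A returns [], B returns []; on findAndReplacePattern(['ab'], 'abc'): A raises IndexError, B returns []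
import Mathlib
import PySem

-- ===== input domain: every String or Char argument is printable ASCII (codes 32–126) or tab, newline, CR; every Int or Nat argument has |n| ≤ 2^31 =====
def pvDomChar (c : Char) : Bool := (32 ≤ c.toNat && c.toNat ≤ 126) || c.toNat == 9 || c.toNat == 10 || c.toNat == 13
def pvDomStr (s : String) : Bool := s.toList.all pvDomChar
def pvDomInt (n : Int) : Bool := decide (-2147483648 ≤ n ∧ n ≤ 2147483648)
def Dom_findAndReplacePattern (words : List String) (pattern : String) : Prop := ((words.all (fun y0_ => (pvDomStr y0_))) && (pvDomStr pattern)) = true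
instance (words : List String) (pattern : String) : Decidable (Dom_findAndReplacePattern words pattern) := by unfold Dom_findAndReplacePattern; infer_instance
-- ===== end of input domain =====

-- B replaces A's per-word incremental bijection check (dict + values() scan) with a canonical
-- first-occurrence fingerprint: each word's norm of its first len(pattern) chars is compared to
-- the pattern's fingerprint computed once (alternative algorithm; return values proved equal).


-- ===== PORT A =====
-- inner loop of A: index i over range(len(pattern)), one dict, break on mismatch
-- or when word[i] already appears among the dict's values; 'for…else' appends on no break.
def pvAInner (pat wrd : List Char) (i : Nat) (d : PySem.Dict Char Char) : Bool :=
  if _h : i < pat.length then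
    let p := pat.getD i ' '
    let w := wrd.getD i ' '
    if d.contains p then
      if d.get? p ≠ some w then false else pvAInner pat wrd (i + 1) d
    else
      if ¬ (w ∈ d.values) then pvAInner pat wrd (i + 1) (d.insert p w)
      else false
  else true
termination_by pat.length - i

def findAndReplacePattern (words : List String) (pattern : String) : List String :=
  words.foldl
    (fun successful word =>
      if pvAInner pattern.toList word.toList 0 PySem.Dict.empty then successful ++ [word]
      else successful)
    []

-- ===== PORT B =====
-- B's norm: [seen.setdefault(c, len(seen)) for c in s] — the first-occurrence fingerprint.
def pvNormGo : List Char → PySem.Dict Char Int → List Int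
  | [], _ => []
  | c :: rest, seen =>
    ((seen.get? c).getD (seen.size : Int)) :: pvNormGo rest (seen.setdefault c (seen.size : Int))

def findAndReplacePattern_alt (words : List String) (pattern : String) : List String :=
  let n := pattern.toList.length
  let target := pvNormGo pattern.toList PySem.Dict.empty
  words.filter (fun w => pvNormGo (w.toList.take n) PySem.Dict.empty == target)

-- ===== PRECONDITION & SPEC =====
-- Pre_ excludes inputs containing a word shorter than the pattern: there A's word[i]
-- raises IndexError unless a mismatch happens to break the loop first.
def Pre_findAndReplacePattern (words : List String) (pattern : String) : Prop :=
  ∀ w ∈ words, pattern.toList.length ≤ w.toList.length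
instance (words : List String) (pattern : String) : Decidable (Pre_findAndReplacePattern words pattern) := by unfold Pre_findAndReplacePattern; infer_instance
def pvWitness_findAndReplacePattern : List String × String := (["abc", "xyz", "aab", "mee"], "foo")

def Spec_findAndReplacePattern (words : List String) (pattern : String) (out : List String) : Prop := out = findAndReplacePattern_alt words pattern
instance (words : List String) (pattern : String) (out : List String) : Decidable (Spec_findAndReplacePattern words pattern out) := by unfold Spec_findAndReplacePattern; infer_instance

-- ===== CLAIM (what is proved, stated in full; the proofs are below) =====
def Claim_equal_findAndReplacePattern : Prop := ∀ (words : List String) (pattern : String), Dom_findAndReplacePattern words pattern → Pre_findAndReplacePattern words pattern → Spec_findAndReplacePattern words pattern (findAndReplacePattern words pattern)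

-- ===== LEMMAS AND PROOFS =====


-- size of insert at a fresh key
lemma pv_size_insert_fresh {V : Type} (d : PySem.Dict Char V) (k : Char) (v : V)
    (h : d.contains k = false) : (d.insert k v).size = d.size + 1 := by
  simp [PySem.Dict.size, PySem.Dict.items_insert, h]

-- values of insert at a fresh key
lemma pv_values_insert_fresh {V : Type} (d : PySem.Dict Char V) (k : Char) (v : V)
    (h : d.contains k = false) : (d.insert k v).values = d.values ++ [v] := by
  simp [PySem.Dict.values, PySem.Dict.items_insert, h]

-- core invariant: A's dict d is the bijection whose two sides are the fingerprint dicts sp, sw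
lemma pv_inner_eq (pat wrd : List Char) (hlen : pat.length ≤ wrd.length) :
    ∀ (n i : Nat) (d : PySem.Dict Char Char) (sp sw : PySem.Dict Char Int),
      i + n = pat.length →
      d.keys.Nodup →
      (∀ p w, d.get? p = some w ↔ ∃ k, sp.get? p = some k ∧ sw.get? w = some k) →
      (∀ p k, sp.get? p = some k → 0 ≤ k ∧ k < (d.size : Int)) →
      (∀ w k, sw.get? w = some k → 0 ≤ k ∧ k < (d.size : Int)) →
      (∀ p, (sp.get? p).isSome = (d.get? p).isSome) →
      (∀ w, (sw.get? w).isSome = decide (w ∈ d.values)) →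
      sp.size = d.size → sw.size = d.size →
      (pvAInner pat wrd i d = true ↔
        pvNormGo (pat.drop i) sp = pvNormGo ((wrd.take pat.length).drop i) sw) := by
  intro n
  induction n with
  | zero =>
    intro i d sp sw hi hd hR hbp hbw hDp hDw hsp hsw
    have hni : ¬ i < pat.length := by omega
    rw [pvAInner, dif_neg hni, List.drop_eq_nil_of_le (by omega),
      List.drop_eq_nil_of_le (by simp; omega)]
    simp [pvNormGo]
  | succ n ih =>
    intro i d sp sw hi hd hR hbp hbw hDp hDw hsp hsw
    have hip : i < pat.length := by omega
    have hiw : i < wrd.length := by omega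
    have hit : i < (wrd.take pat.length).length := by simp; omega
    have hgp : pat.getD i ' ' = pat[i] := by simp [List.getD_eq_getElem?_getD, hip]
    have hgw : wrd.getD i ' ' = wrd[i] := by simp [List.getD_eq_getElem?_getD, hiw]
    have htake : (wrd.take pat.length)[i] = wrd[i] := List.getElem_take
    rw [List.drop_eq_getElem_cons hip, List.drop_eq_getElem_cons hit,
      pvAInner, dif_pos hip, pvNormGo, pvNormGo]
    simp only [hgp, hgw, htake]
    by_cases hc : d.contains pat[i]
    · -- pat[i] already a key of d
      rw [if_pos hc]
      have hsome : (d.get? pat[i]).isSome := by rw [← PySem.Dict.contains_eq_isSome_get?, hc]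
      obtain ⟨w', hv⟩ := Option.isSome_iff_exists.1 hsome
      by_cases hvw : d.get? pat[i] = some wrd[i]
      · -- match: heads equal, dicts unchanged
        rw [if_neg (by simpa using hvw)]
        obtain ⟨k, hk1, hk2⟩ := (hR pat[i] wrd[i]).1 hvw
        have hcs : sp.contains pat[i] = true := by
          rw [PySem.Dict.contains_eq_isSome_get?, hk1]; rfl
        have hcw : sw.contains wrd[i] = true := by
          rw [PySem.Dict.contains_eq_isSome_get?, hk2]; rfl
        rw [PySem.Dict.setdefault_of_contains _ _ hcs, PySem.Dict.setdefault_of_contains _ _ hcw,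
          hk1, hk2]
        have hih := ih (i + 1) d sp sw (by omega) hd hR hbp hbw hDp hDw hsp hsw
        simp [hih]
      · -- mismatch: A breaks, heads differ
        rw [if_pos (by simpa using hvw)]
        have hne : w' ≠ wrd[i] := fun h => hvw (h ▸ hv)
        obtain ⟨k, hk1, hk2⟩ := (hR pat[i] w').1 hv
        have hhead : ((sp.get? pat[i]).getD (sp.size : Int)) ≠
            ((sw.get? wrd[i]).getD (sw.size : Int)) := by
          rw [hk1]
          rcases h2 : sw.get? wrd[i] with _ | k2
          · have := (hbp pat[i] k hk1).2
            simp only [Option.getD_some, Option.getD_none, hsw]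
            omega
          · simp only [Option.getD_some]
            intro hkk
            subst hkk
            have : d.get? pat[i] = some wrd[i] := (hR pat[i] wrd[i]).2 ⟨k, hk1, h2⟩
            exact hvw this
        constructor
        · intro h; exact absurd h (by simp)
        · intro hx; exact absurd (List.cons_eq_cons.1 hx).1 hhead
    · -- pat[i] fresh
      rw [if_neg hc]
      have hnone : d.get? pat[i] = none := by
        rcases h : d.get? pat[i] with _ | v
        · rfl
        · exact absurd (by rw [PySem.Dict.contains_eq_isSome_get?, h]; rfl) hc
      have hspnone : sp.get? pat[i] = none := by
        have := hDp pat[i]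
        rw [hnone] at this
        exact Option.not_isSome_iff_eq_none.1 (by simp [this])
      by_cases hmem : wrd[i] ∈ d.values
      · -- wrd[i] already a value: A breaks, heads differ
        rw [if_neg (not_not_intro hmem)]
        have hswsome : (sw.get? wrd[i]).isSome := by rw [hDw]; simpa using hmem
        obtain ⟨k2, h2⟩ := Option.isSome_iff_exists.1 hswsome
        have hhead : ((sp.get? pat[i]).getD (sp.size : Int)) ≠
            ((sw.get? wrd[i]).getD (sw.size : Int)) := by
          rw [hspnone, h2]
          have := (hbw wrd[i] k2 h2).2
          simp only [Option.getD_none, Option.getD_some, hsp]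
          omega
        constructor
        · intro h; exact absurd h (by simp)
        · intro hx; exact absurd (List.cons_eq_cons.1 hx).1 hhead
      · -- both fresh: both extend and recurse
        rw [if_pos hmem]
        have hcf : d.contains pat[i] = false := by simpa using hc
        have hswnone : sw.get? wrd[i] = none := by
          have := hDw wrd[i]
          rw [decide_eq_false hmem] at this
          exact Option.not_isSome_iff_eq_none.1 (by simp [this])
        have hcsp : sp.contains pat[i] = false := by
          rw [PySem.Dict.contains_eq_isSome_get?, hspnone]; rfl
        have hcsw : sw.contains wrd[i] = false := by
          rw [PySem.Dict.contains_eq_isSome_get?, hswnone]; rfl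
        rw [PySem.Dict.setdefault_of_not_contains _ _ hcsp,
          PySem.Dict.setdefault_of_not_contains _ _ hcsw, hspnone, hswnone]
        have hd' : (d.insert pat[i] wrd[i]).keys.Nodup :=
          PySem.Dict.nodup_keys_insert d pat[i] wrd[i] hd
        have hsize' : (d.insert pat[i] wrd[i]).size = d.size + 1 :=
          pv_size_insert_fresh d pat[i] wrd[i] hcf
        have hvals' : (d.insert pat[i] wrd[i]).values = d.values ++ [wrd[i]] :=
          pv_values_insert_fresh d pat[i] wrd[i] hcf
        have hih := ih (i + 1) (d.insert pat[i] wrd[i])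
          (sp.insert pat[i] (sp.size : Int)) (sw.insert wrd[i] (sw.size : Int))
          (by omega) hd' ?_ ?_ ?_ ?_ ?_ ?_ ?_
        · simp only [hih, hsp, hsw]
          simp
        · -- R'
          intro p' w'
          simp only [PySem.Dict.get?_insert]
          by_cases hp' : p' = pat[i] <;> by_cases hw' : w' = wrd[i]
          · subst hp'; subst hw'; simp [hsp, hsw]
          · subst hp'
            rw [if_pos rfl, if_pos rfl]
            simp only [if_neg hw']
            constructor
            · intro h; exact absurd (Option.some_inj.1 h).symm hw'
            · rintro ⟨k, hk1, hk2⟩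
              have := (hbw w' k hk2).2
              have hk : (sp.size : Int) = k := Option.some_inj.1 hk1
              rw [← hk, hsp] at this; omega
          · subst hw'
            simp only [if_neg hp']
            constructor
            · intro h
              obtain ⟨k, hk1, hk2⟩ := (hR p' wrd[i]).1 h
              rw [hswnone] at hk2; cases hk2
            · rintro ⟨k, hk1, hk2⟩
              have := (hbp p' k hk1).2
              have hk : (sw.size : Int) = k := Option.some_inj.1 hk2
              rw [← hk, hsw] at this; omega
          · simp only [if_neg hp', if_neg hw']
            exact hR p' w'
        · -- bounds sp'
          intro p' k
          rw [PySem.Dict.get?_insert]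
          split_ifs with h
          · intro hk
            cases Option.some_inj.1 hk
            rw [hsize']
            omega
          · intro hk
            have := hbp p' k hk
            rw [hsize']
            omega
        · -- bounds sw'
          intro w' k
          rw [PySem.Dict.get?_insert]
          split_ifs with h
          · intro hk
            cases Option.some_inj.1 hk
            rw [hsize']
            omega
          · intro hk
            have := hbw w' k hk
            rw [hsize']
            omega
        · -- dom sp'
          intro p'
          rw [PySem.Dict.get?_insert, PySem.Dict.get?_insert]
          split_ifs with h
          · rfl
          · exact hDp p'
        · -- dom sw'
          intro w'
          rw [PySem.Dict.get?_insert, hvals']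
          split_ifs with h
          · subst h; simp
          · rw [hDw w']
            simp [h]
        · rw [pv_size_insert_fresh sp pat[i] _ hcsp, hsize', hsp]
        · rw [pv_size_insert_fresh sw wrd[i] _ hcsw, hsize', hsw]

-- ===== VERDICT (by name: the statement is the Claim_ definition above) =====
theorem findAndReplacePattern_spec : Claim_equal_findAndReplacePattern := by
  intro words pattern _ hpre
  unfold Spec_findAndReplacePattern findAndReplacePattern findAndReplacePattern_alt
  rw [show (fun (successful : List String) (word : String) =>
        if pvAInner pattern.toList word.toList 0 PySem.Dict.empty then successful ++ [word]
        else successful)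
      = (fun acc x => if (fun word => pvAInner pattern.toList word.toList 0 PySem.Dict.empty) x
          = true then acc ++ [id x] else acc) from rfl,
    PySem.List.foldl_append_if, List.map_id, List.nil_append]
  apply List.filter_congr
  intro word hmem
  have key := pv_inner_eq pattern.toList word.toList (hpre word hmem) pattern.toList.length 0
    PySem.Dict.empty PySem.Dict.empty PySem.Dict.empty (by omega)
    PySem.Dict.nodup_keys_empty
    (by intro p w; simp [PySem.Dict.get?_empty])
    (by intro p k; simp [PySem.Dict.get?_empty])
    (by intro w k; simp [PySem.Dict.get?_empty])
    (by intro p; rfl)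
    (by intro w; simp [PySem.Dict.empty, PySem.Dict.get?, PySem.Dict.values])
    rfl rfl
  simp only [List.drop_zero] at key
  by_cases hA : pvAInner pattern.toList word.toList 0 PySem.Dict.empty = true
  · rw [hA]
    symm
    rw [beq_iff_eq]
    exact (key.1 hA).symm
  · rw [Bool.eq_false_iff.2 hA]
    symm
    rw [Bool.eq_false_iff]
    intro hbeq
    exact hA (key.2 (beq_iff_eq.1 hbeq).symm)
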